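-- pv_equiv track=rewrite | github.com/BruinGrowly/LJPW-Language-Translator | experiments/semantic_resonance_analysis.py | _has_reduplication
-- ===== SOURCE A (Python) =====
-- def _has_reduplication(word: str) -> bool:
--     """Detect reduplication (repeated syllables)."""
--     if len(word) < 4:
--         return False
--
--     # Check for repeated patterns
--     for length in range(2, len(word)//2 + 1):
--         chunk1 = word[:length]
--         chunk2 = word[length:length*2]
--         if chunk1 == chunk2:
--             return True
--
--     return False
-- ===== SOURCE B (Python) =====
-- def _has_reduplication(word: str) -> bool:
--     """Detect reduplication: for each candidate chunk length, compute the
--     z-value (length of the longest common prefix of the word and its suffix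
--     starting at that offset) and test whether it covers a whole chunk."""
--     n = len(word)
--     for start in range(2, n // 2 + 1):
--         m = 0
--         while start + m < n and word[m] == word[start + m]:
--             m += 1
--         if m >= start:
--             return True
--     return False
-- ===== Notes on version B (the rewrite author's own statement) =====
-- stated objective: alternative
-- what changed: B replaces A's per-length slice construction and slice comparison by computing, for each offset, the z-value (longest common prefix of the word with its suffix at that offset) via a character-level matching loop with early mismatch exit, and testing z >= offset.
import Mathlib
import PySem

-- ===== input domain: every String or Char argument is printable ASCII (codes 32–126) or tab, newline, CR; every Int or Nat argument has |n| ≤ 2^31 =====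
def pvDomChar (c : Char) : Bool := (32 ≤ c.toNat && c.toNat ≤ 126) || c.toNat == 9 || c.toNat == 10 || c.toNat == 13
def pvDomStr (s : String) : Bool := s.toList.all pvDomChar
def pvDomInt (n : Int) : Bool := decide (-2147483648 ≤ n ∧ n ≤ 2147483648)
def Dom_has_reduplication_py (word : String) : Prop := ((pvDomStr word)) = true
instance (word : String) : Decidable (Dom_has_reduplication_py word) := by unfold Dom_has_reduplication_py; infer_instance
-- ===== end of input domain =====

-- B replaces A's per-length slice comparison by a character-level z-value
-- (longest-common-prefix) computation per offset; alternative decomposition, same asymptotic cost.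

-- ===== PORT A =====
-- port of A: guard len < 4, then for length in range(2, len//2+1) compare word[:length] with word[length:2*length]
def has_reduplication_py (word : String) : Bool :=
  let cs := word.toList
  if cs.length < 4 then false
  else
    (PySem.List.pyRange 2 (PySem.Int.floordiv (cs.length : Int) 2 + 1) 1).any fun length =>
      PySem.List.slice cs none (some length) == PySem.List.slice cs (some length) (some (length * 2))

-- ===== PORT B =====
-- the inner `while start+m < n and word[m] == word[start+m]: m += 1` loop: structural
-- recursion matching the word against its suffix, returning the match count m
def lcpLen : List Char → List Char → Nat
  | a :: as, b :: bs => if a = b then lcpLen as bs + 1 else 0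
  | _, _ => 0

def has_reduplication_py_alt (word : String) : Bool :=
  let cs := word.toList
  (List.range' 2 (cs.length / 2 + 1 - 2)).any fun start =>
    decide (start ≤ lcpLen cs (cs.drop start))

-- ===== PRECONDITION & SPEC =====
def Spec_has_reduplication_py (word : String) (out : Bool) : Prop := out = has_reduplication_py_alt word
instance (word : String) (out : Bool) : Decidable (Spec_has_reduplication_py word out) := by unfold Spec_has_reduplication_py; infer_instance

-- ===== CLAIM (what is proved, stated in full; the proofs are below) =====
def Claim_equal_has_reduplication_py : Prop := ∀ (word : String), Dom_has_reduplication_py word → Spec_has_reduplication_py word (has_reduplication_py word)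

-- ===== LEMMAS AND PROOFS =====

theorem lcpLen_ge_iff (k : Nat) : ∀ (xs ys : List Char), k ≤ xs.length →
    (k ≤ lcpLen xs ys ↔ xs.take k = ys.take k) := by
  induction k with
  | zero => intro xs ys _; simp
  | succ k ih =>
    intro xs ys hk
    match xs, ys with
    | x :: xs', [] => simp [lcpLen]
    | x :: xs', y :: ys' =>
      by_cases hxy : x = y
      · subst hxy
        rw [show lcpLen (x :: xs') (x :: ys') = lcpLen xs' ys' + 1 from by simp [lcpLen]]
        simp only [List.take_succ_cons, Nat.add_le_add_iff_right, List.cons.injEq, true_and]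
        exact ih xs' ys' (by simpa using hk)
      · simp [lcpLen, hxy]

theorem floordiv_two_natCast (n : Nat) :
    PySem.Int.floordiv (n : Int) 2 = ((n / 2 : Nat) : Int) := by
  simp [PySem.Int.floordiv, Int.fdiv_eq_ediv]

theorem has_reduplication_eq (word : String) :
    has_reduplication_py word = has_reduplication_py_alt word := by
  unfold has_reduplication_py has_reduplication_py_alt
  set cs := word.toList with hcs
  by_cases h4 : cs.length < 4
  · have h0 : cs.length / 2 - 1 = 0 := by omega
    simp [h4, h0]
  · rw [if_neg h4, floordiv_two_natCast]
    rw [Bool.eq_iff_iff]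
    simp only [List.any_eq_true, PySem.List.mem_pyRange_one, List.mem_range'_1,
      beq_iff_eq, decide_eq_true_eq]
    constructor
    · rintro ⟨L, ⟨hL2, hLub⟩, hp⟩
      set k := L.toNat with hkdef
      have hLk : L = (k : Int) := by omega
      have hk2 : 2 ≤ k := by omega
      have hkub : k ≤ cs.length / 2 := by omega
      refine ⟨k, ⟨hk2, by omega⟩, ?_⟩
      rw [hLk] at hp
      have h2k : (k : Int) * 2 = ((k * 2 : Nat) : Int) := by push_cast; ring
      rw [h2k, PySem.List.slice_to_natCast, PySem.List.slice_natCast] at hp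
      have hkk : k * 2 - k = k := by omega
      rw [hkk] at hp
      exact (lcpLen_ge_iff k cs (cs.drop k) (by omega)).mpr hp
    · rintro ⟨k, ⟨hk2, hkub'⟩, hp⟩
      have hkub : k ≤ cs.length / 2 := by omega
      refine ⟨(k : Int), ⟨by exact_mod_cast hk2, by omega⟩, ?_⟩
      have h2k : (k : Int) * 2 = ((k * 2 : Nat) : Int) := by push_cast; ring
      rw [h2k, PySem.List.slice_to_natCast, PySem.List.slice_natCast]
      have hkk : k * 2 - k = k := by omega
      rw [hkk]
      exact (lcpLen_ge_iff k cs (cs.drop k) (by omega)).mp hp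

-- ===== VERDICT (by name: the statement is the Claim_ definition above) =====
theorem has_reduplication_py_spec : Claim_equal_has_reduplication_py := by
  intro word _
  unfold Spec_has_reduplication_py
  exact has_reduplication_eq word
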